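-- pv_equiv track=rewrite | github.com/Elvis1327/Python | Algorithms/LeetCode/FindSubarraysWithEqualSum.py | findSubarraysThree
-- ===== SOURCE A (Python) =====
-- def findSubarraysThree(nums = [4,2,4]):
--     hash = {}
--     for i in range(len(nums) - 1):
--         x = sum(nums[i:i+2])
--         if x in hash:
--             return True
--         else:
--             hash[x] = x
--     return False
-- ===== SOURCE B (Python) =====
-- def findSubarraysThree(nums=[4, 2, 4]):
--     s = sorted(a + b for a, b in zip(nums, nums[1:]))
--     for prev, cur in zip(s, s[1:]):
--         if prev == cur:
--             return True
--     return False
-- ===== Notes on version B (the rewrite author's own statement) =====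
-- stated objective: alternative
-- what changed: Replaces the hash-set duplicate scan with sort-then-adjacent-compare over the list of adjacent-pair sums built by zip.
import Mathlib
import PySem

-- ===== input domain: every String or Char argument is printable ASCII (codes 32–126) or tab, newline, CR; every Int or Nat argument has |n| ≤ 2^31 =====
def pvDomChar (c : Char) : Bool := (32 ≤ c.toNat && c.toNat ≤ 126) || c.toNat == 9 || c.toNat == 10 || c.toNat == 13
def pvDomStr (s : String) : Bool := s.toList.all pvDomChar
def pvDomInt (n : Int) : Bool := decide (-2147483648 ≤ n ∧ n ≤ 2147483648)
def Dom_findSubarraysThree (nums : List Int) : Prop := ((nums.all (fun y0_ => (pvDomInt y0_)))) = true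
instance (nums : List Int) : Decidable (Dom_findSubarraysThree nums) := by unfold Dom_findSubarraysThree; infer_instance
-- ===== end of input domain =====

-- B replaces A's hash-based duplicate scan over adjacent-pair sums with sort-then-adjacent-compare (alternative algorithm, same results).


-- ===== PORT A =====
-- loop body of A: for each index i, x = sum(nums[i:i+2]); return True if x in hash else record it
def findSubarraysThreeGo (nums : List Int) : List Int → PySem.Dict Int Int → Bool
  | [], _ => false
  | i :: rest, h =>
    let x := (PySem.List.slice nums (some i) (some (i + 2))).sum
    if h.contains x then true
    else findSubarraysThreeGo nums rest (h.insert x x)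

def findSubarraysThree (nums : List Int) : Bool :=
  findSubarraysThreeGo nums (PySem.List.pyRange 0 ((nums.length : Int) - 1) 1) PySem.Dict.empty

-- ===== PORT B =====
-- s = sorted(a + b for a, b in zip(nums, nums[1:]))
def pairSums (nums : List Int) : List Int :=
  ((nums.zip nums.tail).map (fun p => p.1 + p.2))

-- for prev, cur in zip(s, s[1:]): if prev == cur: return True; return False
def hasAdjDup : List Int → Bool
  | a :: b :: t => a == b || hasAdjDup (b :: t)
  | _ => false

def findSubarraysThree_alt (nums : List Int) : Bool :=
  hasAdjDup (PySem.List.sorted (pairSums nums) (fun x => x) false)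

-- ===== PRECONDITION & SPEC =====
def Spec_findSubarraysThree (nums : List Int) (out : Bool) : Prop := out = findSubarraysThree_alt nums
instance (nums : List Int) (out : Bool) : Decidable (Spec_findSubarraysThree nums out) := by unfold Spec_findSubarraysThree; infer_instance

-- ===== CLAIM (what is proved, stated in full; the proofs are below) =====
def Claim_equal_findSubarraysThree : Prop := ∀ (nums : List Int), Dom_findSubarraysThree nums → Spec_findSubarraysThree nums (findSubarraysThree nums)

-- ===== LEMMAS AND PROOFS =====

-- A's loop detects a duplicate among the seen keys plus the values it will compute
lemma findSubarraysThreeGo_iff (nums : List Int) :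
    ∀ (is : List Int) (h : PySem.Dict Int Int), h.keys.Nodup →
      (findSubarraysThreeGo nums is h = true ↔
        ¬ (h.keys ++ is.map (fun i => (PySem.List.slice nums (some i) (some (i + 2))).sum)).Nodup) := by
  intro is
  induction is with
  | nil =>
    intro h hnd
    simp [findSubarraysThreeGo, hnd]
  | cons i rest ih =>
    intro h hnd
    simp only [findSubarraysThreeGo, List.map_cons]
    set x := (PySem.List.slice nums (some i) (some (i + 2))).sum with hx
    by_cases hc : h.contains x = true
    · simp only [hc, if_true, true_iff]
      intro hnodup
      have hxmem : x ∈ h.keys := (PySem.Dict.contains_iff_mem_keys h x).1 hc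
      have := (List.nodup_append.1 hnodup).2.2
      exact this x hxmem x (by simp) rfl
    · have hc' : h.contains x = false := by simpa using hc
      simp only [hc', Bool.false_eq_true, if_false]
      have hkeys : (h.insert x x).keys = h.keys ++ [x] := by
        simp [PySem.Dict.keys_insert_of_not_contains, hc']
      have hnd' : (h.insert x x).keys.Nodup := by
        simp [PySem.Dict.nodup_keys_insert, hnd]
      rw [ih (h.insert x x) hnd', hkeys, List.append_assoc]
      simp
-- the values A computes, in index order, are exactly B's pair sums
lemma map_slice_sum_eq_pairSums (nums : List Int) :
    (PySem.List.pyRange 0 ((nums.length : Int) - 1) 1).map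
      (fun i => (PySem.List.slice nums (some i) (some (i + 2))).sum) = pairSums nums := by
  rw [PySem.List.pyRange_one, List.map_map]
  have hlen : (((nums.length : Int) - 1) - 0).toNat = nums.length - 1 := by omega
  rw [hlen]
  apply List.ext_getElem
  · simp [pairSums, List.length_tail]
  · intro k hk1 hk2
    simp only [List.length_map, List.length_range] at hk1
    have hk : k + 1 < nums.length := by omega
    have hk' : k < nums.length := by omega
    simp only [List.getElem_map, List.getElem_range, Function.comp_apply, zero_add]
    have hcast : ((k : Int) + 2) = ((k + 2 : Nat) : Int) := by push_cast; ring
    rw [hcast, PySem.List.slice_natCast]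
    have hdrop : nums.drop k = nums[k] :: nums.drop (k + 1) := List.drop_eq_getElem_cons hk'
    have hdrop' : nums.drop (k + 1) = nums[k + 1] :: nums.drop (k + 2) := List.drop_eq_getElem_cons hk
    rw [hdrop, hdrop']
    have h2 : k + 2 - k = 2 := by omega
    simp only [h2, List.take_succ_cons, List.take_zero, List.sum_cons, List.sum_nil, add_zero]
    simp [pairSums, List.getElem_tail]

-- adjacent-equal scan on a ≤-sorted list detects exactly non-Nodup
lemma hasAdjDup_iff : ∀ (l : List Int), l.Pairwise (· ≤ ·) → (hasAdjDup l = true ↔ ¬ l.Nodup)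
  | [] => by simp [hasAdjDup]
  | [a] => by simp [hasAdjDup]
  | a :: b :: t => by
    intro hp
    have hp' : (b :: t).Pairwise (· ≤ ·) := hp.tail
    have hab : a ≤ b := (List.pairwise_cons.1 hp).1 b (by simp)
    by_cases he : a = b
    · subst he
      simp [hasAdjDup]
    · have hrec := hasAdjDup_iff (b :: t) hp'
      have hnotmem : a ∉ b :: t := by
        intro hmem
        rcases List.mem_cons.1 hmem with h1 | h2
        · exact he h1
        · have hbt : b ≤ a := (List.pairwise_cons.1 hp').1 a h2
          exact he (le_antisymm hab hbt)
      simp only [hasAdjDup, Bool.or_eq_true, beq_iff_eq, he, false_or]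
      rw [hrec]
      constructor
      · intro hnd hnodup
        exact hnd (List.nodup_cons.1 hnodup).2
      · intro hnd hnodup
        exact hnd (List.nodup_cons.2 ⟨hnotmem, hnodup⟩)

-- ===== VERDICT (by name: the statement is the Claim_ definition above) =====
theorem findSubarraysThree_spec : Claim_equal_findSubarraysThree := by
  intro nums _
  unfold Spec_findSubarraysThree
  have hA : findSubarraysThree nums = true ↔ ¬ (pairSums nums).Nodup := by
    unfold findSubarraysThree
    rw [findSubarraysThreeGo_iff nums _ PySem.Dict.empty (by simp),
      map_slice_sum_eq_pairSums]
    simp [PySem.Dict.keys_empty]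
  have hB : findSubarraysThree_alt nums = true ↔ ¬ (pairSums nums).Nodup := by
    unfold findSubarraysThree_alt
    rw [hasAdjDup_iff _ (PySem.List.sorted_pairwise (pairSums nums) (fun x => x))]
    have hperm := PySem.List.sorted_perm (pairSums nums) (fun x : Int => x) false
    rw [hperm.nodup_iff]
  rw [Bool.eq_iff_iff, hA, hB]
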